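-- pv_equiv track=rewrite | github.com/Sunil1983us/XSDBank | tools/ig_extractor.py | _build_xpath
-- ===== SOURCE A (Python) =====
-- def _build_xpath(col3_lines: list[str]) -> str:
--     """
--     Convert the multi-row col-3 path into a single XPath string.
--
--     Col-3 uses +/++/+++ prefix to denote depth:
--         FITo FICustomer Credit Transfer V08   → root (depth 0)
--         +Group Header                          → depth 1
--         ++Settlement Information               → depth 2
--         +++Instructing Reimbursement Agent     → depth 3  (may wrap!)
--         Account                                → continuation of depth 3 (no +)
--
--     Continuation lines (no leading +, not the root line) are joined to the
--     previous line that had a + prefix, fixing wrapped long element names.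
--     """
--     # First pass: join continuation lines to their preceding + line
--     merged: list[str] = []
--     for line in col3_lines:
--         if not line or not line.strip():
--             continue
--         stripped = line.strip()
--         has_plus = stripped.startswith('+')
--         is_root  = not stripped.startswith('+') and len(merged) == 0
--
--         if has_plus or is_root:
--             merged.append(stripped)
--         else:
--             # Continuation — join to the last line
--             if merged:
--                 merged[-1] = merged[-1] + ' ' + stripped
--             else:
--                 merged.append(stripped)
--
--     if not merged:
--         return ''
--
--     # Second pass: build hierarchy from + counts
--     path_parts = []   # (depth, name)
--     for line in merged:
--         depth = len(line) - len(line.lstrip('+'))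
--         name  = line.lstrip('+').strip()
--         if name:
--             path_parts.append((depth, name))
--
--     if not path_parts:
--         return ''
--
--     # Build stack to reconstruct full path
--     stack = []
--     for depth, name in path_parts:
--         while stack and stack[-1][0] >= depth:
--             stack.pop()
--         stack.append((depth, name))
--
--     return '/'.join(name for _, name in stack)
-- ===== SOURCE B (Python) =====
-- def _build_xpath(col3_lines: list[str]) -> str:
--     # Single merging pass building (depth, name) pairs directly, then a
--     # right-to-left suffix-strict-minimum scan instead of a push/pop stack.
--     parts: list[tuple[int, str]] = []
--     for line in col3_lines:
--         s = line.strip()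
--         if not s:
--             continue
--         if s.startswith('+') or not parts:
--             rest = s.lstrip('+')
--             parts.append((len(s) - len(rest), rest.strip()))
--         else:
--             d, n = parts[-1]
--             parts[-1] = (d, (n + ' ' + s).strip())
--
--     names: list[str] = []
--     lo = None
--     for d, n in reversed(parts):
--         if n and (lo is None or d < lo):
--             names.append(n)
--             lo = d
--     return '/'.join(reversed(names))
-- ===== Notes on version B (the rewrite author's own statement) =====
-- stated objective: alternative
-- what changed: A's three passes (merge continuation lines, extract (depth,name) pairs, forward push/pop stack) become one merging pass that builds the (depth,name) pairs directly plus a single right-to-left scan keeping a name iff its depth is strictly below the running minimum; no stack and no separate extraction pass.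
import Mathlib
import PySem

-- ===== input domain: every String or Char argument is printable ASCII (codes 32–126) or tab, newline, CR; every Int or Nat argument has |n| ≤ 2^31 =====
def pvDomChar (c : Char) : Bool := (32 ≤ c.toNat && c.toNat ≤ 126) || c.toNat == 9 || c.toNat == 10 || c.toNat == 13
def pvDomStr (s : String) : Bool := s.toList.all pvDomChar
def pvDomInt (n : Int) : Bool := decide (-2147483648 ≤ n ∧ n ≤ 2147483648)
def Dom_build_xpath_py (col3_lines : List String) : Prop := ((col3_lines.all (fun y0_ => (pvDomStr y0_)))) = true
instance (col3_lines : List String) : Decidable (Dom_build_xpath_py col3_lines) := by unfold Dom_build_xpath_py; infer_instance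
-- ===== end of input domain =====

-- B replaces A's three passes (merge, extract, push/pop stack) by one merging pass that builds
-- (depth, name) pairs directly plus a right-to-left suffix-strict-minimum scan; objective: alternative.

-- ===== PORT A =====
-- merge pass: one Python loop iteration ('line.lstrip("+")' is ported as dropWhile (· == '+'), exact)
def pvStepA (merged : List (List Char)) (line : String) : List (List Char) :=
  if line.toList = [] ∨ PySem.Chars.strip line.toList = [] then merged
  else
    let stripped := PySem.Chars.strip line.toList
    let hasPlus := PySem.Chars.startswith stripped ['+']
    let isRoot := !hasPlus && merged.isEmpty
    if hasPlus || isRoot then merged ++ [stripped]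
    else if merged ≠ [] then merged.dropLast ++ [(merged.getLast?.getD []) ++ ' ' :: stripped]
    else merged ++ [stripped]

-- second pass: (depth, name) extraction
def pvPartStep (acc : List (Nat × List Char)) (l : List Char) : List (Nat × List Char) :=
  let rest := l.dropWhile (· == '+')
  let depth := l.length - rest.length
  let name := PySem.Chars.strip rest
  if name ≠ [] then acc ++ [(depth, name)] else acc

-- 'while stack and stack[-1][0] >= depth: stack.pop()' (the stack is kept head-at-top)
def pvPopA (d : Nat) : List (Nat × List Char) → List (Nat × List Char)
  | [] => []
  | (e, n) :: rest => if d ≤ e then pvPopA d rest else (e, n) :: rest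

def pvStackStep (st : List (Nat × List Char)) (p : Nat × List Char) : List (Nat × List Char) :=
  p :: pvPopA p.1 st

def build_xpath_py (col3_lines : List String) : String :=
  let merged := col3_lines.foldl pvStepA []
  if merged = [] then ""
  else
    let parts := merged.foldl pvPartStep []
    if parts = [] then ""
    else
      let stack := parts.foldl pvStackStep []
      String.mk (PySem.Chars.join ['/'] (stack.reverse.map Prod.snd))

-- ===== PORT B =====
-- Source B's merging loop; parts are stored most-recent-first (head = parts[-1]), so the
-- 'reversed(parts)' of the scan below is this accumulator read left to right.
def pvStepB (acc : List (Nat × List Char)) (line : String) : List (Nat × List Char) :=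
  let s := PySem.Chars.strip line.toList
  if s = [] then acc
  else if PySem.Chars.startswith s ['+'] || acc.isEmpty then
    let rest := s.dropWhile (· == '+')   -- s.lstrip('+'), exact
    (s.length - rest.length, PySem.Chars.strip rest) :: acc
  else
    match acc with
    | (d, n) :: r => (d, PySem.Chars.strip (n ++ ' ' :: s)) :: r
    | [] => acc  -- unreachable: the branch above handles acc = []

-- Source B's reverse scan with the running strict minimum 'lo'; returns names in collection order
def pvScanB : List (Nat × List Char) → Option Nat → List (List Char)
  | [], _ => []
  | (d, n) :: rest, lo =>
    if !n.isEmpty && (match lo with | none => true | some m => decide (d < m)) then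
      n :: pvScanB rest (some d)
    else pvScanB rest lo

def build_xpath_py_alt (col3_lines : List String) : String :=
  let partsRev := col3_lines.foldl pvStepB []
  String.mk (PySem.Chars.join ['/'] (pvScanB partsRev none).reverse)

-- ===== PRECONDITION & SPEC =====
def Spec_build_xpath_py (col3_lines : List String) (out : String) : Prop := out = build_xpath_py_alt col3_lines
instance (col3_lines : List String) (out : String) : Decidable (Spec_build_xpath_py col3_lines out) := by unfold Spec_build_xpath_py; infer_instance

-- ===== CLAIM (what is proved, stated in full; the proofs are below) =====
def Claim_equal_build_xpath_py : Prop := ∀ (col3_lines : List String), Dom_build_xpath_py col3_lines → Spec_build_xpath_py col3_lines (build_xpath_py col3_lines)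

-- ===== LEMMAS AND PROOFS =====

-- proof-side helpers: (depth, name) of a merged line, 'no trailing whitespace', the running-min test
def pvPd (l : List Char) : Nat × List Char :=
  (l.length - (l.dropWhile (· == '+')).length, PySem.Chars.strip (l.dropWhile (· == '+')))

def pvOkEnd (u : List Char) : Prop :=
  List.dropWhile PySem.Chars.isspace u.reverse = u.reverse

def pvBelow (lo : Option Nat) (p : Nat × List Char) : Bool :=
  match lo with | none => true | some m => decide (p.1 < m)

theorem pv_dropWhile_append_cons {p : Char → Bool} {c : Char} (h : p c = false)
    (a b : List Char) : (a ++ c :: b).dropWhile p = a.dropWhile p ++ c :: b := by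
  rw [List.dropWhile_append]
  by_cases he : (a.dropWhile p).isEmpty
  · simp at he
    simp [he, List.dropWhile_cons, h]
  · simp [he]

theorem pv_dropWhile_eq_self_append {p : Char → Bool} {a : List Char}
    (h : a.dropWhile p = a) (hne : a ≠ []) (r : List Char) :
    (a ++ r).dropWhile p = a ++ r := by
  rw [List.dropWhile_append, h]
  simp [hne]

theorem pv_dropWhile_head {p : Char → Bool} {X : List Char} {c : Char} {r : List Char}
    (h : X.dropWhile p = c :: r) : p c = false := by
  induction X with
  | nil => simp at h
  | cons a X ih =>
    rw [List.dropWhile_cons] at h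
    split at h
    · exact ih h
    · cases h; simpa using ‹¬ p c = true›

theorem pv_okEnd_of_head {u : List Char}
    (h : ∀ c r, u.reverse = c :: r → PySem.Chars.isspace c = false) :
    List.dropWhile PySem.Chars.isspace u.reverse = u.reverse := by
  cases hv : u.reverse with
  | nil => simp
  | cons c r => rw [List.dropWhile_cons_of_neg (by simp [h c r hv])]

theorem pv_okEnd_strip (w : List Char) : pvOkEnd (PySem.Chars.strip w) := by
  apply pv_okEnd_of_head
  intro c r h
  simp [PySem.Chars.strip, PySem.Chars.rstrip] at h
  exact pv_dropWhile_head h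

theorem pv_okEnd_dropWhile {y : List Char} (h : pvOkEnd y) (q : Char → Bool) :
    pvOkEnd (y.dropWhile q) := by
  apply pv_okEnd_of_head
  intro c r hv
  have hy : y.reverse = c :: (r ++ (y.takeWhile q).reverse) := by
    conv_lhs => rw [← List.takeWhile_append_dropWhile (p := q) (l := y)]
    rw [List.reverse_append, hv]
    simp
  unfold pvOkEnd at h
  rw [hy] at h
  exact pv_dropWhile_head h

theorem pv_okEnd_append {y s : List Char} (hs : pvOkEnd s) (hne : s ≠ []) :
    pvOkEnd (y ++ ' ' :: s) := by
  apply pv_okEnd_of_head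
  intro c r hv
  obtain ⟨c', r', hs'⟩ : ∃ c' r', s.reverse = c' :: r' := by
    cases h : s.reverse with
    | nil => exact absurd (by simpa using h) hne
    | cons a b => exact ⟨a, b, rfl⟩
  rw [List.reverse_append, List.reverse_cons, hs'] at hv
  simp at hv
  obtain ⟨h1, -⟩ := hv
  unfold pvOkEnd at hs
  rw [hs'] at hs
  subst h1
  exact pv_dropWhile_head hs

theorem pv_nameJoin {u : List Char} (hu : pvOkEnd u) (s : List Char) :
    PySem.Chars.strip (u ++ ' ' :: s)
      = PySem.Chars.strip (PySem.Chars.strip u ++ ' ' :: s) := by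
  simp only [PySem.Chars.strip, PySem.Chars.lstrip, PySem.Chars.rstrip]
  congr 2
  by_cases hu0 : u.dropWhile PySem.Chars.isspace = []
  · rw [List.dropWhile_append, hu0]
    simp
  · have hws : PySem.Chars.isspace ' ' = true := by decide
    have hdrop : (u ++ ' ' :: s).dropWhile PySem.Chars.isspace
        = u.dropWhile PySem.Chars.isspace ++ ' ' :: s := by
      rw [List.dropWhile_append]
      simp [hu0]
    have hok : pvOkEnd (u.dropWhile PySem.Chars.isspace) := pv_okEnd_dropWhile hu _
    have hstr : (List.dropWhile PySem.Chars.isspace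
          (u.dropWhile PySem.Chars.isspace).reverse).reverse = u.dropWhile PySem.Chars.isspace := by
      rw [hok]; simp
    rw [hdrop, hstr]
    rw [pv_dropWhile_eq_self_append (List.dropWhile_idempotent _ _) hu0]

theorem pv_pd_append {y : List Char} (hy : pvOkEnd y) (s : List Char) :
    pvPd (y ++ ' ' :: s) = ((pvPd y).1, PySem.Chars.strip ((pvPd y).2 ++ ' ' :: s)) := by
  have hplus : ((' ' : Char) == '+') = false := by decide
  have hdw : (y ++ ' ' :: s).dropWhile (· == '+') = y.dropWhile (· == '+') ++ ' ' :: s :=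
    pv_dropWhile_append_cons (p := fun x => x == '+') hplus y s
  unfold pvPd
  refine Prod.ext ?_ ?_
  · simp only [hdw]
    have := List.length_dropWhile_le (p := (· == '+')) (l := y)
    simp [List.length_append]
    omega
  · simp only [hdw]
    exact pv_nameJoin (pv_okEnd_dropWhile hy _) s

theorem pv_stepInv (merged : List (List Char)) (hm : ∀ X ∈ merged, pvOkEnd X) (line : String) :
    pvStepB (merged.reverse.map pvPd) line = ((pvStepA merged line).reverse).map pvPd
    ∧ ∀ X ∈ pvStepA merged line, pvOkEnd X := by
  by_cases hs : PySem.Chars.strip line.toList = []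
  · refine ⟨by simp [pvStepA, pvStepB, hs], ?_⟩
    simp only [pvStepA, hs]
    simpa using hm
  · have hline : ¬ (line.toList = [] ∨ PySem.Chars.strip line.toList = []) := by
      rintro (h | h)
      · exact hs (by simp [h]; rfl)
      · exact hs h
    simp only [pvStepA, pvStepB, hline, if_false, if_neg hline, if_neg hs]
    have hOkS : pvOkEnd (PySem.Chars.strip line.toList) := pv_okEnd_strip _
    generalize hg : PySem.Chars.strip line.toList = s at *
    by_cases hp : PySem.Chars.startswith s ['+'] = true
    · refine ⟨?_, ?_⟩
      · simp [hp, pvPd]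
      · simp only [hp, Bool.true_or, if_true]
        intro X hX
        rcases List.mem_append.mp hX with hX | hX
        · exact hm X hX
        · simp at hX; subst hX; exact hOkS
    · have hp' : PySem.Chars.startswith s ['+'] = false := by simpa using hp
      by_cases hM : merged = []
      · subst hM
        refine ⟨by simp [hp', pvPd], ?_⟩
        simp only [hp']
        simpa using hOkS
      · obtain ⟨y, t, hrev⟩ : ∃ y t, merged.reverse = y :: t := by
          cases h : merged.reverse with
          | nil => exact absurd (by simpa using h) hM
          | cons a b => exact ⟨a, b, rfl⟩
        have hmerged : merged = t.reverse ++ [y] := by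
          have := congrArg List.reverse hrev
          simpa using this
        have hOkY : pvOkEnd y := hm y (by rw [hmerged]; simp)
        have hpd := pv_pd_append hOkY s
        have hne : merged ≠ [] := hM
        refine ⟨?_, ?_⟩
        · simp only [hp', Bool.false_or, if_neg hM, if_pos hne]
          rw [hrev, hmerged]
          have hEmpty : ((y :: t).map pvPd).isEmpty = false := by simp
          simp only [List.map_cons, hEmpty]
          simp [List.dropLast_concat, List.getLast?_concat, hpd]
        · have hie : merged.isEmpty = false := by simp [hM]
          simp only [hp', hie, Bool.not_false, Bool.true_and, Bool.false_or, Bool.false_eq_true,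
            if_false, if_pos hne]
          intro X hX
          rw [hmerged, List.dropLast_concat, List.getLast?_concat] at hX
          rcases List.mem_append.mp hX with hX | hX
          · exact hm X (by rw [hmerged]; exact List.mem_append.mpr (Or.inl hX))
          · simp at hX
            subst hX
            exact pv_okEnd_append hOkS hs

theorem pv_mergeInv (lines : List String) :
    ∀ (merged : List (List Char)),
      (∀ X ∈ merged, pvOkEnd X) →
      lines.foldl pvStepB (merged.reverse.map pvPd)
          = ((lines.foldl pvStepA merged).reverse).map pvPd
        ∧ ∀ X ∈ lines.foldl pvStepA merged, pvOkEnd X := by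
  induction lines with
  | nil => intro merged hm; exact ⟨rfl, hm⟩
  | cons line rest ih =>
    intro merged hm
    obtain ⟨h1, h2⟩ := pv_stepInv merged hm line
    rw [List.foldl_cons, List.foldl_cons, h1]
    exact ih (pvStepA merged line) h2

theorem pv_popA_sublist (d : Nat) (st : List (Nat × List Char)) :
    (pvPopA d st).Sublist st := by
  induction st with
  | nil => simp [pvPopA]
  | cons p rest ih =>
    obtain ⟨e, n⟩ := p
    simp only [pvPopA]
    split
    · exact ih.trans (List.sublist_cons_self _ _)
    · exact List.Sublist.refl _

theorem pv_popA_mem_lt {d : Nat} {st : List (Nat × List Char)}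
    (h : st.Pairwise (fun a b => b.1 < a.1)) {q} (hq : q ∈ pvPopA d st) : q.1 < d := by
  induction st with
  | nil => simp [pvPopA] at hq
  | cons p rest ih =>
    obtain ⟨e, n⟩ := p
    rw [List.pairwise_cons] at h
    simp only [pvPopA] at hq
    split at hq
    · exact ih h.2 hq
    · rcases List.mem_cons.mp hq with hq | hq
      · subst hq; omega
      · have := h.1 q hq
        omega

theorem pv_stk_pairwise (ps : List (Nat × List Char)) :
    (ps.foldl pvStackStep []).Pairwise (fun a b => b.1 < a.1) := by
  induction ps using List.reverseRecOn with
  | nil => simp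
  | append_singleton qs p ih =>
    rw [List.foldl_append]
    simp only [List.foldl_cons, List.foldl_nil, pvStackStep]
    rw [List.pairwise_cons]
    exact ⟨fun q hq => pv_popA_mem_lt ih hq, ih.sublist (pv_popA_sublist _ _)⟩

theorem pv_popA_eq_filter {d : Nat} {st : List (Nat × List Char)}
    (h : st.Pairwise (fun a b => b.1 < a.1)) :
    pvPopA d st = st.filter (fun p => decide (p.1 < d)) := by
  induction st with
  | nil => rfl
  | cons p rest ih =>
    obtain ⟨e, n⟩ := p
    rw [List.pairwise_cons] at h
    simp only [pvPopA, List.filter_cons]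
    split
    · rename_i hde
      rw [if_neg (by simpa using (by omega : ¬ e < d))]
      exact ih h.2
    · rename_i hde
      rw [if_pos (by simp; omega)]
      congr 1
      refine (List.filter_eq_self.mpr ?_).symm
      intro q hq
      have := h.1 q hq
      simp; omega

theorem pv_scan_filter (xs : List (Nat × List Char)) :
    ∀ lo : Option Nat, pvScanB xs lo = pvScanB (xs.filter (fun p => !p.2.isEmpty)) lo := by
  induction xs with
  | nil => intro lo; rfl
  | cons p rest ih =>
    intro lo
    obtain ⟨d, n⟩ := p
    by_cases hn : n.isEmpty
    · simp only [pvScanB, List.filter_cons, hn, Bool.not_true, Bool.false_and,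
        Bool.false_eq_true, if_false]
      exact ih lo
    · have hn' : n.isEmpty = false := by simpa using hn
      cases lo with
      | none =>
        simp only [pvScanB, List.filter_cons, hn', Bool.not_false, Bool.true_and, if_true]
        rw [ih (some d)]
      | some m =>
        by_cases hdm : d < m
        · simp only [pvScanB, List.filter_cons, hn', Bool.not_false, Bool.true_and, if_true,
            decide_eq_true hdm]
          rw [ih (some d)]
        · have : decide (d < m) = false := by simpa using hdm
          simp only [pvScanB, List.filter_cons, hn', Bool.not_false, Bool.true_and, if_true,
            this, Bool.and_false, Bool.false_eq_true, if_false]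
          exact ih (some m)

theorem pv_scan_stack (ps : List (Nat × List Char)) :
    ∀ lo : Option Nat, (∀ p ∈ ps, p.2 ≠ ([] : List Char)) →
      pvScanB ps.reverse lo
        = (((ps.foldl pvStackStep []).filter (pvBelow lo)).map Prod.snd) := by
  induction ps using List.reverseRecOn with
  | nil => intro lo _; rfl
  | append_singleton qs p ih =>
    intro lo hne
    have hp2 : p.2 ≠ [] := hne p (by simp)
    have hq2 : ∀ q ∈ qs, q.2 ≠ ([] : List Char) := fun q hq => hne q (by simp [hq])
    obtain ⟨d, n⟩ := p
    rw [List.reverse_append]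
    simp only [List.reverse_singleton, List.singleton_append]
    rw [List.foldl_append]
    simp only [List.foldl_cons, List.foldl_nil, pvStackStep]
    rw [pv_popA_eq_filter (pv_stk_pairwise qs)]
    have hni : n.isEmpty = false := by simpa using hp2
    simp only [pvScanB, hni, Bool.not_false, Bool.true_and]
    by_cases hb : pvBelow lo (d, n) = true
    · rw [if_pos (by simpa [pvBelow] using hb)]
      rw [List.filter_cons, if_pos hb, List.map_cons]
      congr 1
      rw [ih (some d) hq2]
      congr 1
      rw [List.filter_filter]
      apply List.filter_congr
      intro q hq
      simp only [pvBelow]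
      cases lo with
      | none => simp
      | some m =>
        simp only [pvBelow] at hb
        simp at hb ⊢
        omega
    · have hb' : pvBelow lo (d, n) = false := by simpa using hb
      obtain ⟨m, hm⟩ : ∃ m, lo = some m := by
        cases lo with
        | none => simp [pvBelow] at hb'
        | some m => exact ⟨m, rfl⟩
      subst hm
      simp only [pvBelow] at hb'
      rw [if_neg (by simpa using hb')]
      rw [List.filter_cons, if_neg (by simp [pvBelow]; simpa using hb')]
      have hff : List.filter (pvBelow (some m))
            (List.filter (fun p => decide (p.1 < d)) (List.foldl pvStackStep [] qs))
          = List.filter (pvBelow (some m)) (List.foldl pvStackStep [] qs) := by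
        rw [List.filter_filter]
        apply List.filter_congr
        intro q hq
        simp only [pvBelow]
        simp at hb' ⊢
        omega
      rw [hff, ih (some m) hq2]

theorem pv_ne_nil_eq (xs : List Char) : (decide (xs ≠ [])) = !xs.isEmpty := by
  cases xs <;> simp

theorem pv_parts_eq (M : List (List Char)) :
    M.foldl pvPartStep [] = (M.filter (fun l => !(pvPd l).2.isEmpty)).map pvPd := by
  have hstep : pvPartStep = fun acc l => if (pvPd l).2 ≠ [] then acc ++ [pvPd l] else acc := by
    funext acc l
    simp [pvPartStep, pvPd]
  rw [hstep, PySem.List.foldl_append_ite (p := fun l => (pvPd l).2 ≠ []) (f := pvPd)]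
  rw [List.nil_append]
  congr 1
  apply List.filter_congr
  intro l _
  exact pv_ne_nil_eq _

theorem build_xpath_py_spec_aux (lines : List String) :
    build_xpath_py lines = build_xpath_py_alt lines := by
  obtain ⟨hAcc, hOk⟩ := pv_mergeInv lines [] (by simp)
  simp only [List.reverse_nil, List.map_nil] at hAcc
  simp only [build_xpath_py, build_xpath_py_alt, hAcc]
  rw [pv_scan_filter]
  rw [show ((lines.foldl pvStepA []).reverse.map pvPd) = ((lines.foldl pvStepA []).map pvPd).reverse from (List.map_reverse ..)]
  rw [List.filter_reverse, List.filter_map]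
  rw [show ((fun p => !(Prod.snd p).isEmpty) ∘ pvPd) = (fun l => !(pvPd l).2.isEmpty) from rfl]
  rw [← pv_parts_eq]
  by_cases hM : lines.foldl pvStepA [] = []
  · rw [if_pos hM, hM]
    rfl
  · rw [if_neg hM]
    by_cases hP : (lines.foldl pvStepA []).foldl pvPartStep [] = []
    · rw [if_pos hP, hP]
      rfl
    · rw [if_neg hP]
      have hnames : ∀ p ∈ (lines.foldl pvStepA []).foldl pvPartStep [], p.2 ≠ ([] : List Char) := by
        intro p hp
        rw [pv_parts_eq] at hp
        obtain ⟨l, hl, rfl⟩ := List.mem_map.mp hp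
        have := (List.mem_filter.mp hl).2
        simpa using this
      rw [pv_scan_stack _ none hnames]
      have htrue : pvBelow none = fun _ => true := rfl
      rw [htrue, List.filter_true]
      congr 1
      rw [← List.map_reverse]

-- ===== VERDICT (by name: the statement is the Claim_ definition above) =====
theorem build_xpath_py_spec : Claim_equal_build_xpath_py := by
  intro lines _
  exact build_xpath_py_spec_aux lines
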